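-- pv_equiv track=rewrite | github.com/mHarish04/Clinical-analyzer-app | backend/pdf_processor.py | extract_key_sections
-- ===== SOURCE A (Python) =====
-- def extract_key_sections(text_content):
--     """
--     Extract key medical sections from PDF text
--     Reduces token count by ~85% by focusing on important sections
--
--     Args:
--         text_content (str): Full extracted text from PDF
--
--     Returns:
--         dict: Structured data with key sections
--     """
--     sections = {
--         'patient_info': '',
--         'diagnosis': '',
--         'findings': '',
--         'recommendations': '',
--         'full_text_preview': ''
--     }
--
--     # Split text into lines for easier processing
--     lines = text_content.split('\n')
--
--     # Keywords to identify sections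
--     patient_keywords = ['patient', 'demographics', 'name:', 'age:', 'dob', 'medical record']
--     diagnosis_keywords = ['diagnosis', 'assessment', 'impression', 'clinical diagnosis']
--     findings_keywords = ['findings', 'results', 'observations', 'examination', 'vital signs']
--     recommendations_keywords = ['recommendations', 'plan', 'treatment', 'follow-up', 'prescriptions']
--
--     current_section = None
--     temp_text = ""
--
--     # Process each line
--     for i, line in enumerate(lines):
--         line_lower = line.lower()
--
--         # Check for section headers
--         if any(keyword in line_lower for keyword in patient_keywords):
--             if temp_text and current_section:
--                 sections[current_section] = temp_text.strip()
--             current_section = 'patient_info'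
--             temp_text = line + "\n"
--         elif any(keyword in line_lower for keyword in diagnosis_keywords):
--             if temp_text and current_section:
--                 sections[current_section] = temp_text.strip()
--             current_section = 'diagnosis'
--             temp_text = line + "\n"
--         elif any(keyword in line_lower for keyword in findings_keywords):
--             if temp_text and current_section:
--                 sections[current_section] = temp_text.strip()
--             current_section = 'findings'
--             temp_text = line + "\n"
--         elif any(keyword in line_lower for keyword in recommendations_keywords):
--             if temp_text and current_section:
--                 sections[current_section] = temp_text.strip()
--             current_section = 'recommendations'
--             temp_text = line + "\n"
--         else:
--             # Add line to current section
--             if current_section: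
--                 temp_text += line + "\n"
--
--     # Don't forget the last section
--     if temp_text and current_section:
--         sections[current_section] = temp_text.strip()
--
--     # If sections not found, use full text but limit to first 2000 characters
--     # (roughly 400-500 tokens)
--     if not any([sections['diagnosis'], sections['findings'], sections['recommendations']]):
--         sections['full_text_preview'] = text_content[:2000]
--
--     return sections
-- ===== SOURCE B (Python) =====
-- def extract_key_sections(text_content):
--     """Segment-splitting reimplementation: classify header lines once, then
--     group each header with its following non-header lines and join/strip."""
--     table = [
--         ('patient_info', ['patient', 'demographics', 'name:', 'age:', 'dob', 'medical record']),
--         ('diagnosis', ['diagnosis', 'assessment', 'impression', 'clinical diagnosis']),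
--         ('findings', ['findings', 'results', 'observations', 'examination', 'vital signs']),
--         ('recommendations', ['recommendations', 'plan', 'treatment', 'follow-up', 'prescriptions']),
--     ]
--
--     def classify(line):
--         low = line.lower()
--         for name, kws in table:
--             if any(k in low for k in kws):
--                 return name
--         return None
--
--     sections = {
--         'patient_info': '',
--         'diagnosis': '',
--         'findings': '',
--         'recommendations': '',
--         'full_text_preview': ''
--     }
--
--     lines = text_content.split('\n')
--     n = len(lines)
--
--     # skip everything before the first header line
--     i = 0
--     while i < n and classify(lines[i]) is None:
--         i += 1
--
--     # each header starts a segment running to the next header (or the end)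
--     while i < n:
--         name = classify(lines[i])
--         j = i + 1
--         while j < n and classify(lines[j]) is None:
--             j += 1
--         sections[name] = "\n".join(lines[i:j]).strip()
--         i = j
--
--     if not (sections['diagnosis'] or sections['findings'] or sections['recommendations']):
--         sections['full_text_preview'] = text_content[:2000]
--
--     return sections
-- ===== Notes on version B (the rewrite author's own statement) =====
-- stated objective: alternative
-- what changed: Replaced the single-pass accumulator state machine (current_section + growing temp_text string flushed at each header) by a segment-splitting decomposition: classify lines, skip the pre-header prefix, then for each header take its run of non-header lines, slice, join with newline and strip, assigning per segment.
import Mathlib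
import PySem

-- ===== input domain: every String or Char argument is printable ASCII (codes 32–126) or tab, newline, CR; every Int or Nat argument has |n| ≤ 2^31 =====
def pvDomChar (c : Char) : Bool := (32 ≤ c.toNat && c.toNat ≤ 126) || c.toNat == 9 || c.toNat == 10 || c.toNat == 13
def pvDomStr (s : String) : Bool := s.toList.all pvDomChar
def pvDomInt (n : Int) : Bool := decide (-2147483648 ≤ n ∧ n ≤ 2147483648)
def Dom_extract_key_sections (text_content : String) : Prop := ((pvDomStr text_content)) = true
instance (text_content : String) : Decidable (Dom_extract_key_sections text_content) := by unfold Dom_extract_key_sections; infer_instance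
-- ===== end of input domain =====

-- B replaces A's accumulator state machine by a segment-splitting decomposition (classify headers, group each header with its run of non-header lines, join/strip per segment); objective: alternative, same cost.

-- ===== PORT A =====
def pvKwPatient : List (List Char) :=
  ["patient".toList, "demographics".toList, "name:".toList, "age:".toList, "dob".toList, "medical record".toList]
def pvKwDiagnosis : List (List Char) :=
  ["diagnosis".toList, "assessment".toList, "impression".toList, "clinical diagnosis".toList]
def pvKwFindings : List (List Char) :=
  ["findings".toList, "results".toList, "observations".toList, "examination".toList, "vital signs".toList]
def pvKwRecommendations : List (List Char) :=
  ["recommendations".toList, "plan".toList, "treatment".toList, "follow-up".toList, "prescriptions".toList]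

def pvInitSections : PySem.Dict String String :=
  ⟨[("patient_info", ""), ("diagnosis", ""), ("findings", ""), ("recommendations", ""), ("full_text_preview", "")]⟩

-- `if temp_text and current_section: sections[current_section] = temp_text.strip()`
def pvFlushA (d : PySem.Dict String String) (cur : Option String) (temp : List Char) : PySem.Dict String String :=
  match cur with
  | some c => if temp = [] then d else d.insert c (String.ofList (PySem.Chars.strip temp))
  | none => d

-- one iteration of A's for-loop; state = (sections, current_section, temp_text)
def pvStepA (st : PySem.Dict String String × Option String × List Char) (line : List Char) :
    PySem.Dict String String × Option String × List Char :=
  let ll := PySem.Chars.lower line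
  if pvKwPatient.any (fun k => PySem.Chars.isIn k ll) then
    (pvFlushA st.1 st.2.1 st.2.2, some "patient_info", line ++ ['\n'])
  else if pvKwDiagnosis.any (fun k => PySem.Chars.isIn k ll) then
    (pvFlushA st.1 st.2.1 st.2.2, some "diagnosis", line ++ ['\n'])
  else if pvKwFindings.any (fun k => PySem.Chars.isIn k ll) then
    (pvFlushA st.1 st.2.1 st.2.2, some "findings", line ++ ['\n'])
  else if pvKwRecommendations.any (fun k => PySem.Chars.isIn k ll) then
    (pvFlushA st.1 st.2.1 st.2.2, some "recommendations", line ++ ['\n'])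
  else
    match st.2.1 with
    | some _ => (st.1, st.2.1, st.2.2 ++ (line ++ ['\n']))
    | none => st

def extract_key_sections (text_content : String) : List (String × String) :=
  let lines := PySem.Chars.splitOn text_content.toList ['\n']
  let st := lines.foldl pvStepA (pvInitSections, none, [])
  let d := pvFlushA st.1 st.2.1 st.2.2
  let d := if PySem.Dict.getD d "diagnosis" "" ≠ "" ∨ PySem.Dict.getD d "findings" "" ≠ "" ∨
              PySem.Dict.getD d "recommendations" "" ≠ "" then d
           else d.insert "full_text_preview" (String.ofList (PySem.List.slice text_content.toList none (some 2000)))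
  d.items

-- ===== PORT B =====
def pvTableB : List (String × List (List Char)) :=
  [("patient_info", ["patient".toList, "demographics".toList, "name:".toList, "age:".toList, "dob".toList, "medical record".toList]),
   ("diagnosis", ["diagnosis".toList, "assessment".toList, "impression".toList, "clinical diagnosis".toList]),
   ("findings", ["findings".toList, "results".toList, "observations".toList, "examination".toList, "vital signs".toList]),
   ("recommendations", ["recommendations".toList, "plan".toList, "treatment".toList, "follow-up".toList, "prescriptions".toList])]

-- Source B's classify: first table entry one of whose keywords occurs in the lowered line
def pvClassifyB (line : List Char) : Option String :=
  let ll := PySem.Chars.lower line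
  pvTableB.findSome? (fun nk => if nk.2.any (fun k => PySem.Chars.isIn k ll) then some nk.1 else none)

def pvNoHeader (l : List Char) : Bool := (pvClassifyB l).isNone

-- Source B's segment loop: each header line together with its run of following non-header lines
def pvGroupsB : List (List Char) → List (String × List (List Char))
  | [] => []
  | h :: t =>
    match pvClassifyB h with
    | some name => (name, h :: t.takeWhile pvNoHeader) :: pvGroupsB (t.dropWhile pvNoHeader)
    | none => pvGroupsB t
termination_by ls => ls.length
decreasing_by
  · have := List.length_dropWhile_le pvNoHeader t; simp; omega
  · simp

def pvInitB : PySem.Dict String String :=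
  ⟨[("patient_info", ""), ("diagnosis", ""), ("findings", ""), ("recommendations", ""), ("full_text_preview", "")]⟩

-- sections[name] = "\n".join(seg).strip()
def pvApplySeg (d : PySem.Dict String String) (g : String × List (List Char)) : PySem.Dict String String :=
  d.insert g.1 (String.ofList (PySem.Chars.strip (PySem.Chars.join ['\n'] g.2)))

def extract_key_sections_alt (text_content : String) : List (String × String) :=
  let lines := PySem.Chars.splitOn text_content.toList ['\n']
  let d := (pvGroupsB (lines.dropWhile pvNoHeader)).foldl pvApplySeg pvInitB
  let d := if PySem.Dict.getD d "diagnosis" "" ≠ "" ∨ PySem.Dict.getD d "findings" "" ≠ "" ∨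
              PySem.Dict.getD d "recommendations" "" ≠ "" then d
           else d.insert "full_text_preview" (String.ofList (PySem.List.slice text_content.toList none (some 2000)))
  d.items

-- ===== PRECONDITION & SPEC =====
def Spec_extract_key_sections (text_content : String) (out : List (String × String)) : Prop := out = extract_key_sections_alt text_content
instance (text_content : String) (out : List (String × String)) : Decidable (Spec_extract_key_sections text_content out) := by unfold Spec_extract_key_sections; infer_instance

-- ===== CLAIM (what is proved, stated in full; the proofs are below) =====
def Claim_equal_extract_key_sections : Prop := ∀ (text_content : String), Dom_extract_key_sections text_content → Spec_extract_key_sections text_content (extract_key_sections text_content)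

-- ===== LEMMAS AND PROOFS =====

-- temp_text as built by A from the collected segment lines
def pvFlat (seg : List (List Char)) : List Char := seg.flatMap (fun l => l ++ ['\n'])

theorem pvFlat_ne_nil (seg : List (List Char)) (h : seg ≠ []) : pvFlat seg ≠ [] := by
  cases seg with
  | nil => exact absurd rfl h
  | cons a s => simp [pvFlat]

theorem pvFlat_append_singleton (seg : List (List Char)) (l : List Char) :
    pvFlat (seg ++ [l]) = pvFlat seg ++ (l ++ ['\n']) := by
  simp [pvFlat]

theorem pvFlat_singleton (l : List Char) : pvFlat [l] = l ++ ['\n'] := by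
  simp [pvFlat]

theorem pvFlat_eq_join (seg : List (List Char)) (h : seg ≠ []) :
    pvFlat seg = PySem.Chars.join ['\n'] seg ++ ['\n'] := by
  induction seg with
  | nil => exact absurd rfl h
  | cons a s ih =>
    cases s with
    | nil => simp [pvFlat, PySem.Chars.join, List.intercalate]
    | cons b s' =>
      rw [PySem.Chars.join_cons_cons]
      have : pvFlat (a :: b :: s') = a ++ '\n' :: pvFlat (b :: s') := by simp [pvFlat]
      rw [this, ih (by simp)]
      simp [PySem.Chars.join]

theorem pvStrip_append_newline (x : List Char) :
    PySem.Chars.strip (x ++ ['\n']) = PySem.Chars.strip x := by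
  simp only [PySem.Chars.strip, PySem.Chars.lstrip, PySem.Chars.rstrip]
  rw [List.dropWhile_append]
  by_cases hx : (List.dropWhile PySem.Chars.isspace x).isEmpty
  · simp [List.isEmpty_iff.mp hx, PySem.Chars.isspace]
  · simp [hx, List.reverse_append, PySem.Chars.isspace]

theorem pvStrip_flat (seg : List (List Char)) (h : seg ≠ []) :
    PySem.Chars.strip (pvFlat seg) = PySem.Chars.strip (PySem.Chars.join ['\n'] seg) := by
  rw [pvFlat_eq_join seg h, pvStrip_append_newline]

theorem pvGroupsB_nil : pvGroupsB [] = [] := by rw [pvGroupsB]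

theorem pvFlushA_none (d : PySem.Dict String String) (temp : List Char) : pvFlushA d none temp = d := rfl

theorem pvGroupsB_cons_some {l : List Char} {t : List (List Char)} {n : String}
    (h : pvClassifyB l = some n) :
    pvGroupsB (l :: t) = (n, l :: t.takeWhile pvNoHeader) :: pvGroupsB (t.dropWhile pvNoHeader) := by
  rw [pvGroupsB]; rw [h]

-- A's loop step, phrased through B's classifier
theorem pvStepA_classify (st : PySem.Dict String String × Option String × List Char) (line : List Char) :
    pvStepA st line =
      match pvClassifyB line with
      | some n => (pvFlushA st.1 st.2.1 st.2.2, some n, line ++ ['\n'])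
      | none =>
        match st.2.1 with
        | some _ => (st.1, st.2.1, st.2.2 ++ (line ++ ['\n']))
        | none => st := by
  simp only [pvStepA, pvClassifyB, pvTableB, pvKwPatient, pvKwDiagnosis, pvKwFindings,
    pvKwRecommendations, List.findSome?_cons, List.findSome?_nil]
  split_ifs <;> rfl

-- A's remaining loop from a live section c with collected lines seg equals B's per-segment folds
theorem pvMainSome (ls : List (List Char)) :
    ∀ (d : PySem.Dict String String) (c : String) (seg : List (List Char)), seg ≠ [] →
    pvFlushA (ls.foldl pvStepA (d, some c, pvFlat seg)).1 (ls.foldl pvStepA (d, some c, pvFlat seg)).2.1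
      (ls.foldl pvStepA (d, some c, pvFlat seg)).2.2 =
      ((c, seg ++ ls.takeWhile pvNoHeader) :: pvGroupsB (ls.dropWhile pvNoHeader)).foldl pvApplySeg d := by
  induction ls with
  | nil =>
    intro d c seg hseg
    simp [pvFlushA, pvFlat_ne_nil seg hseg, pvApplySeg, pvStrip_flat seg hseg, pvGroupsB_nil]
  | cons l t ih =>
    intro d c seg hseg
    rw [List.foldl_cons, pvStepA_classify]
    cases h1 : pvClassifyB l with
    | none =>
      simp only
      have hn : pvNoHeader l = true := by simp [pvNoHeader, h1]
      have hst : (d, some c, pvFlat seg ++ (l ++ ['\n'])) = (d, some c, pvFlat (seg ++ [l])) := by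
        rw [pvFlat_append_singleton]
      rw [hst, ih d c (seg ++ [l]) (by simp)]
      simp [hn]
    | some n =>
      simp only
      have hn : pvNoHeader l = false := by simp [pvNoHeader, h1]
      have hfl : l ++ ['\n'] = pvFlat [l] := (pvFlat_singleton l).symm
      rw [hfl, ih _ n [l] (by simp)]
      rw [List.takeWhile_cons_of_neg (by simp [hn]), List.dropWhile_cons_of_neg (by simp [hn])]
      rw [pvGroupsB_cons_some h1]
      simp only [List.foldl_cons]
      congr 1
      simp [pvApplySeg, pvFlushA, pvFlat_ne_nil seg hseg, pvStrip_flat seg hseg]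

-- A's loop from the initial (no section) state equals B's grouped folds
theorem pvMainNone (ls : List (List Char)) :
    ∀ (d : PySem.Dict String String),
    pvFlushA (ls.foldl pvStepA (d, none, ([] : List Char))).1 (ls.foldl pvStepA (d, none, ([] : List Char))).2.1
      (ls.foldl pvStepA (d, none, ([] : List Char))).2.2 =
      (pvGroupsB (ls.dropWhile pvNoHeader)).foldl pvApplySeg d := by
  induction ls with
  | nil => intro d; simp [pvFlushA, pvGroupsB_nil]
  | cons l t ih =>
    intro d
    rw [List.foldl_cons, pvStepA_classify]
    cases h1 : pvClassifyB l with
    | none =>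
      have hn : pvNoHeader l = true := by simp [pvNoHeader, h1]
      simp only
      rw [ih d]
      simp [hn]
    | some n =>
      have hn : pvNoHeader l = false := by simp [pvNoHeader, h1]
      simp only [pvFlushA_none]
      have hfl : l ++ ['\n'] = pvFlat [l] := (pvFlat_singleton l).symm
      rw [hfl, pvMainSome t d n [l] (by simp)]
      rw [List.dropWhile_cons_of_neg (by simp [hn]), pvGroupsB_cons_some h1]
      simp

-- ===== VERDICT (by name: the statement is the Claim_ definition above) =====
theorem extract_key_sections_spec : Claim_equal_extract_key_sections := by
  intro text_content _
  unfold Spec_extract_key_sections extract_key_sections extract_key_sections_alt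
  simp only
  rw [pvMainNone (PySem.Chars.splitOn text_content.toList ['\n']) pvInitSections,
    show pvInitSections = pvInitB from rfl]
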